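-- pv_equiv track=rewrite | github.com/maru395/freeCodeCampDaily2026 | day24.py | get_bingo_letter
-- ===== SOURCE A (Python) =====
-- def get_bingo_letter(n):
--     ranges = [
--         (1, 15, "B"),
--         (16, 30, "I"),
--         (31, 45, "N"),
--         (46, 60, "G"),
--         (61, 75, "O")
--     ]
--     for low, high, letter in ranges:
--             if low <= n <= high:
--                 return letter
--     return n
-- ===== SOURCE B (Python) =====
-- def get_bingo_letter(n):
--     if 1 <= n <= 75:
--         return "BINGO"[(n - 1) // 15]
--     return n
-- ===== Notes on version B (the rewrite author's own statement) =====
-- stated objective: simpler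
-- what changed: Replaces the scan over five (low, high, letter) range tuples with a single closed-form index (n-1)//15 into the string "BINGO" under a 1..75 range guard.
-- outside the precondition, e.g. on get_bingo_letter(0): A returns 0, B returns 0; on get_bingo_letter(76): A returns 76, B returns 76
import Mathlib
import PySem

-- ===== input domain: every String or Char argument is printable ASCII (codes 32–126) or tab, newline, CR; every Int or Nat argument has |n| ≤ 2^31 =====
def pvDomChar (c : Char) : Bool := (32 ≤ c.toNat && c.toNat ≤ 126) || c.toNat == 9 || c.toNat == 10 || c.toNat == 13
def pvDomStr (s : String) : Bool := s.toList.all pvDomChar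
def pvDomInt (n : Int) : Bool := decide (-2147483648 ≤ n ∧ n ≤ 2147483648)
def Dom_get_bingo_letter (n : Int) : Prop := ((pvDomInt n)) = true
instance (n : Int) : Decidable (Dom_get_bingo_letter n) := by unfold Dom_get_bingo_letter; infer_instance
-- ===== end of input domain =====

-- B replaces A's scan over five range tuples by a closed-form index (n-1)//15 into "BINGO" (simpler).
-- Outside 1..75 the Python returns the int n itself (not a string); Pre_ excludes those inputs.

-- ===== PORT A =====
-- the for-loop over the list of (low, high, letter) tuples, first match returned;
-- falling off the loop would return the int n, which is outside Pre_ (placeholder "").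
def bingoScanA (n : Int) : List (Int × Int × String) → String
  | [] => ""
  | (low, high, letter) :: rest =>
      if low ≤ n ∧ n ≤ high then letter else bingoScanA n rest

def get_bingo_letter (n : Int) : String :=
  bingoScanA n [(1, 15, "B"), (16, 30, "I"), (31, 45, "N"), (46, 60, "G"), (61, 75, "O")]

-- ===== PORT B =====
-- "BINGO"[(n-1)//15] under the range guard; the fall-through 'return n' is outside Pre_ (placeholder "").
def get_bingo_letter_alt (n : Int) : String :=
  if 1 ≤ n ∧ n ≤ 75 then
    match PySem.Str.pyGet? "BINGO" (PySem.Int.floordiv (n - 1) 15) with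
    | some c => String.ofList [c]
    | none => ""
  else ""

-- ===== PRECONDITION & SPEC =====
-- Pre_ excludes n outside 1..75: there A returns the input integer itself, an int, not a
-- value of the declared String return type.
def Pre_get_bingo_letter (n : Int) : Prop := 1 ≤ n ∧ n ≤ 75
instance (n : Int) : Decidable (Pre_get_bingo_letter n) := by unfold Pre_get_bingo_letter; infer_instance
def pvWitness_get_bingo_letter : Int := (7)

def Spec_get_bingo_letter (n : Int) (out : String) : Prop := out = get_bingo_letter_alt n
instance (n : Int) (out : String) : Decidable (Spec_get_bingo_letter n out) := by unfold Spec_get_bingo_letter; infer_instance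

-- ===== CLAIM (what is proved, stated in full; the proofs are below) =====
def Claim_equal_get_bingo_letter : Prop := ∀ (n : Int), Dom_get_bingo_letter n → Pre_get_bingo_letter n → Spec_get_bingo_letter n (get_bingo_letter n)

-- ===== LEMMAS AND PROOFS =====

-- ===== VERDICT =====
theorem get_bingo_letter_spec : Claim_equal_get_bingo_letter := by
  intro n _ hpre
  obtain ⟨h1, h2⟩ := hpre
  unfold Spec_get_bingo_letter
  interval_cases n <;> decide
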